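-- pv_equiv track=rewrite | github.com/MingzheWu418/Joint-Training | colocation/Data.py | gen_colocation_triplet
-- ===== SOURCE A (Python) =====
-- def gen_colocation_triplet(train_x, train_y, prevent_same_type = False):
--     m = 3
--     triplet = []
--     for i in range(len(train_x)): #anchor
--         for j in range(len(train_x)): #negative
--             if prevent_same_type and i % m == j % m:
--                 continue
--             for k in range(len(train_x)): #positive
--                 if train_y[i] == train_y[j] or train_y[i] != train_y[k]:
--                     continue
--                 if i == k:
--                     continue
--                 sample = []
--                 sample.append(train_x[i])
--                 sample.append(train_x[k])
--                 sample.append(train_x[j])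
--                 triplet.append(sample)
--     return triplet
-- ===== SOURCE B (Python) =====
-- def gen_colocation_triplet(train_x, train_y, prevent_same_type=False):
--     n = len(train_x)
--     groups = {}
--     for idx in range(n):
--         groups.setdefault(train_y[idx], []).append(idx)
--     triplet = []
--     for i in range(n):
--         yi = train_y[i]
--         positives = [k for k in groups.get(yi, []) if k != i]
--         for j in range(n):
--             if train_y[j] == yi:
--                 continue
--             if prevent_same_type and i % 3 == j % 3:
--                 continue
--             for k in positives:
--                 triplet.append([train_x[i], train_x[k], train_x[j]])
--     return triplet
-- ===== Notes on version B (the rewrite author's own statement) =====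
-- stated objective: faster
-- what changed: B builds a dict grouping indices by label in one pass and precomputes each anchor's positive list, so the innermost loop just emits triplets instead of rescanning and testing all n candidates for every (anchor, negative) pair.
-- outside the precondition, e.g. on gen_colocation_triplet([1], [], True): A returns [], B raises IndexError
import Mathlib
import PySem

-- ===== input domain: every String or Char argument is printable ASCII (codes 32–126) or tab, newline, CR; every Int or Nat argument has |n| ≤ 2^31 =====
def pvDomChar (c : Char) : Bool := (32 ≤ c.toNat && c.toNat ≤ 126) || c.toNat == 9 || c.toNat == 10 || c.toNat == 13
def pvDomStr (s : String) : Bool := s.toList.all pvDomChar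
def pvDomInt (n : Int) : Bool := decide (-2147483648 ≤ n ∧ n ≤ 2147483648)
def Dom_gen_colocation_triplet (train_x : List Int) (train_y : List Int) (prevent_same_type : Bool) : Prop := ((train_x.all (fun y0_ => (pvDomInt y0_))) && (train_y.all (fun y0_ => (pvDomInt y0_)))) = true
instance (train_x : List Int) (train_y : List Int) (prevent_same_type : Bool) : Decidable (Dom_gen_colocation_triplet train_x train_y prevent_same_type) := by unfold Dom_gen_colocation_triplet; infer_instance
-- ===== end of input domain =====

-- B groups indices by label once (a dict), so for each anchor the positive list is
-- precomputed and the innermost loop carries no test: O(n^2 + output) vs A's O(n^3) scans.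

-- ===== PORT A =====
def gen_colocation_triplet (train_x : List Int) (train_y : List Int) (prevent_same_type : Bool) : List (List Int) :=
  let m : Int := 3
  let n : Int := train_x.length
  (PySem.List.pyRange 0 n 1).foldl (fun triplet i =>
    (PySem.List.pyRange 0 n 1).foldl (fun triplet j =>
      if prevent_same_type && (PySem.Int.mod i m == PySem.Int.mod j m) then triplet
      else (PySem.List.pyRange 0 n 1).foldl (fun triplet k =>
        if (PySem.List.pyGetD train_y i 0 == PySem.List.pyGetD train_y j 0)
            || (PySem.List.pyGetD train_y i 0 != PySem.List.pyGetD train_y k 0) then triplet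
        else if i == k then triplet
        else triplet ++ [[PySem.List.pyGetD train_x i 0, PySem.List.pyGetD train_x k 0, PySem.List.pyGetD train_x j 0]])
        triplet)
      triplet)
    []

-- ===== PORT B =====
def gen_colocation_triplet_alt (train_x : List Int) (train_y : List Int) (prevent_same_type : Bool) : List (List Int) :=
  let n : Int := train_x.length
  let groups : PySem.Dict Int (List Int) :=
    (PySem.List.pyRange 0 n 1).foldl
      (fun d idx => d.modify (PySem.List.pyGetD train_y idx 0) [] (· ++ [idx])) PySem.Dict.empty
  (PySem.List.pyRange 0 n 1).foldl (fun triplet i =>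
    let yi := PySem.List.pyGetD train_y i 0
    let positives := (groups.getD yi []).filter (fun k => k != i)
    (PySem.List.pyRange 0 n 1).foldl (fun triplet j =>
      if PySem.List.pyGetD train_y j 0 == yi then triplet
      else if prevent_same_type && (PySem.Int.mod i 3 == PySem.Int.mod j 3) then triplet
      else positives.foldl (fun triplet k =>
        triplet ++ [[PySem.List.pyGetD train_x i 0, PySem.List.pyGetD train_x k 0, PySem.List.pyGetD train_x j 0]])
        triplet)
      triplet)
    []

-- ===== PRECONDITION & SPEC =====
-- Pre_ excludes train_y shorter than train_x: Python A raises IndexError there, except on the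
-- single degenerate shape (one sample, empty labels, prevent_same_type True) where A returns []
-- before touching train_y while B's grouping pass raises.
def Pre_gen_colocation_triplet (train_x : List Int) (train_y : List Int) (prevent_same_type : Bool) : Prop :=
  train_x.length ≤ train_y.length
instance (train_x : List Int) (train_y : List Int) (prevent_same_type : Bool) : Decidable (Pre_gen_colocation_triplet train_x train_y prevent_same_type) := by unfold Pre_gen_colocation_triplet; infer_instance

def pvWitness_gen_colocation_triplet : List Int × List Int × Bool := ([10, 20, 30], [0, 1, 0], false)

def Spec_gen_colocation_triplet (train_x : List Int) (train_y : List Int) (prevent_same_type : Bool) (out : List (List Int)) : Prop := out = gen_colocation_triplet_alt train_x train_y prevent_same_type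
instance (train_x : List Int) (train_y : List Int) (prevent_same_type : Bool) (out : List (List Int)) : Decidable (Spec_gen_colocation_triplet train_x train_y prevent_same_type out) := by unfold Spec_gen_colocation_triplet; infer_instance

-- ===== CLAIM (what is proved, stated in full; the proofs are below) =====
def Claim_equal_gen_colocation_triplet : Prop := ∀ (train_x : List Int) (train_y : List Int) (prevent_same_type : Bool), Dom_gen_colocation_triplet train_x train_y prevent_same_type → Pre_gen_colocation_triplet train_x train_y prevent_same_type → Spec_gen_colocation_triplet train_x train_y prevent_same_type (gen_colocation_triplet train_x train_y prevent_same_type)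

-- ===== LEMMAS AND PROOFS =====

-- B's grouping dict looked up at any label is just the labels-equal filter of the index range.
theorem groups_getD (train_y : List Int) (n : Int) (c : Int) :
    (((PySem.List.pyRange 0 n 1).foldl
        (fun d idx => d.modify (PySem.List.pyGetD train_y idx 0) [] (· ++ [idx]))
        (PySem.Dict.empty : PySem.Dict Int (List Int))).getD c [])
    = (PySem.List.pyRange 0 n 1).filter (fun k => PySem.List.pyGetD train_y k 0 == c) := by
  have h : ((PySem.List.pyRange 0 n 1).foldl
        (fun d idx => d.modify (PySem.List.pyGetD train_y idx 0) [] (· ++ [idx]))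
        (PySem.Dict.empty : PySem.Dict Int (List Int)))
      = (((PySem.List.pyRange 0 n 1).map (fun idx => (PySem.List.pyGetD train_y idx 0, idx))).foldl
        (fun d p => d.modify p.1 [] (· ++ [p.2])) PySem.Dict.empty) := by
    rw [List.foldl_map]
  rw [h, PySem.Dict.getD_foldl_modify_append, List.filter_map, List.map_map]
  simp [Function.comp_def]

-- A's innermost k-loop (two 'continue's then an append) as a filter.
theorem inner_loop (l : List Int) (c1 c2 : Int → Bool) (f : Int → List Int) (acc : List (List Int)) :
    l.foldl (fun a k => if c1 k then a else if c2 k then a else a ++ [f k]) acc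
    = acc ++ (l.filter (fun k => !c1 k && !c2 k)).map f := by
  have h : ∀ (a : List (List Int)), ∀ k ∈ l,
      (if c1 k then a else if c2 k then a else a ++ [f k])
      = (if (!c1 k && !c2 k) = true then a ++ [f k] else a) := by
    intro a k _
    cases h1 : c1 k <;> cases h2 : c2 k <;> simp
  rw [PySem.List.foldl_congr_mem l _ _ acc h, PySem.List.foldl_append_if]

-- ===== VERDICT (by name: the statement is the Claim_ definition above) =====
theorem gen_colocation_triplet_spec : Claim_equal_gen_colocation_triplet := by
  intro train_x train_y prevent_same_type _ _
  unfold Spec_gen_colocation_triplet gen_colocation_triplet gen_colocation_triplet_alt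
  simp only []
  apply PySem.List.foldl_congr_mem
  intro acc i _
  apply PySem.List.foldl_congr_mem
  intro acc2 j _
  rw [groups_getD, inner_loop, PySem.List.foldl_append_singleton_eq_map]
  by_cases hyj : PySem.List.pyGetD train_y j 0 = PySem.List.pyGetD train_y i 0
  · by_cases hp : (prevent_same_type && (PySem.Int.mod i 3 == PySem.Int.mod j 3)) = true
    · simp at hp
      simp [hp, hyj]
    · simp [hyj]
  · by_cases hp : (prevent_same_type && (PySem.Int.mod i 3 == PySem.Int.mod j 3)) = true
    · simp at hp
      simp [hp, hyj]
    · simp [hyj, List.filter_filter]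
      congr 1
      congr 1
      congr 1
      apply List.filter_congr
      intro k _
      rw [Bool.eq_iff_iff]
      simp
      aesop
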